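-- pv_equiv track=rewrite | github.com/gladklo/bachelorThesis | Skripts/extract_data.py | find_all_setext_sections
-- ===== SOURCE A (Python) =====
-- from typing import List, Tuple, Optional
--
-- def normalize_heading_name(line: str) -> str:
--     # Entfernt führende/folgende Spaces und Sternchen, lowercased
--     return line.strip().strip('*').strip().lower()
--
-- def is_setext_underline(line: str) -> bool:
--     s = line.strip()
--     return len(s) > 0 and set(s) == {'='}
--
-- def find_all_setext_sections(lines: List[str]) -> List[Tuple[str, int, int]]:
--     """
--     Findet ALLE Setext-Sections und liefert Liste (name_norm, start_idx, end_idx_excl).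
--     - name_norm: normalisierter Name (z.B. 'overview', 'tables', 'general description')
--     - start_idx: Index der Überschriftenzeile
--     - end_idx_excl: Zeile der nächsten Section (oder len(lines))
--     """
--     sections: List[Tuple[str, int, int]] = []
--     i = 0
--     while i < len(lines) - 1:
--         name_line = lines[i]
--         underline = lines[i + 1] if i + 1 < len(lines) else ""
--         if is_setext_underline(underline):
--             name_norm = normalize_heading_name(name_line)
--             # Ende suchen: nächste Setext-Überschrift
--             j = i + 2
--             while j < len(lines) - 1:
--                 if is_setext_underline(lines[j + 1]):
--                     break
--                 j += 1
--             end_idx = j if j < len(lines) - 1 else len(lines)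
--             sections.append((name_norm, i, end_idx))
--             i = end_idx
--         else:
--             i += 1
--     return sections
-- ===== SOURCE B (Python) =====
-- from typing import List, Tuple
--
-- def normalize_heading_name(line: str) -> str:
--     return line.strip().strip('*').strip().lower()
--
-- def is_setext_underline(line: str) -> bool:
--     s = line.strip()
--     return len(s) > 0 and set(s) == {'='}
--
-- def find_all_setext_sections(lines: List[str]) -> List[Tuple[str, int, int]]:
--     n = len(lines)
--     # pass 1: every candidate heading position (next line is an '=' underline)
--     candidates = [p for p in range(n - 1) if is_setext_underline(lines[p + 1])]
--     # pass 2: greedy selection — a heading is kept only if it starts at or after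
--     # the previous kept heading + 2 (its underline is not reused as a heading line)
--     kept: List[int] = []
--     last = -2
--     for p in candidates:
--         if p >= last + 2:
--             kept.append(p)
--             last = p
--     # pass 3: each kept heading spans up to the next kept heading (or end of file)
--     return [(normalize_heading_name(lines[p]), p, e)
--             for p, e in zip(kept, kept[1:] + [n])]
-- ===== Notes on version B (the rewrite author's own statement) =====
-- stated objective: alternative
-- what changed: A's single interleaved while-loop that scans for a heading and then jumps past an inner end-search is replaced by three separate passes: build the full table of candidate heading positions, greedily keep those at least 2 apart, and zip each kept position with its successor (or len(lines)) to form the ranges.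
import Mathlib
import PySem

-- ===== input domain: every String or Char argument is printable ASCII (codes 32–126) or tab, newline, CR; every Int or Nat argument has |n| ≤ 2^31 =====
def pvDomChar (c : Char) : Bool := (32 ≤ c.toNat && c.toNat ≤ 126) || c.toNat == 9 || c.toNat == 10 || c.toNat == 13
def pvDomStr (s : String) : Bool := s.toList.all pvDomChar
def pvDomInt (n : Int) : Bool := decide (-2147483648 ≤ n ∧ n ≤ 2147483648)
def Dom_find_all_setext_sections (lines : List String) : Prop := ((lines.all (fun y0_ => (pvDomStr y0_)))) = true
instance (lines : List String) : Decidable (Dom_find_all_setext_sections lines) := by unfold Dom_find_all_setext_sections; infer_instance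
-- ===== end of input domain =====

-- B replaces A's interleaved scan-and-jump while loops by three separate passes (candidate table, greedy keep, zip into ranges); objective: alternative decomposition, same result.

-- shared module helpers: normalize_heading_name, is_setext_underline
def pvNormalize (line : String) : String :=
  PySem.Str.lower (PySem.Str.strip (PySem.Str.stripChars (PySem.Str.strip line) "*"))
def pvIsUnderline (line : String) : Bool :=
  let s := PySem.Str.strip line
  decide (0 < PySem.Str.len s) && PySem.Set.equal (PySem.Set.ofList s.toList) (PySem.Set.ofList ['='])
def pvFindEndA (lines : List String) : Nat → Nat → Nat
  | 0, j => j
  | fuel + 1, j =>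
    if j < lines.length - 1 then
      if pvIsUnderline (lines.getD (j + 1) "") then j
      else pvFindEndA lines fuel (j + 1)
    else j
def pvLoopA (lines : List String) : Nat → Nat → List (String × Int × Int) → List (String × Int × Int)
  | 0, _, acc => acc
  | fuel + 1, i, acc =>
    if i < lines.length - 1 then
      let nameLine := lines.getD i ""
      let underline := if i + 1 < lines.length then lines.getD (i + 1) "" else ""
      if pvIsUnderline underline then
        let j := pvFindEndA lines lines.length (i + 2)
        let endIdx := if j < lines.length - 1 then j else lines.length
        pvLoopA lines fuel endIdx (acc ++ [(pvNormalize nameLine, (i : Int), (endIdx : Int))])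
      else pvLoopA lines fuel (i + 1) acc
    else acc

-- ===== PORT A =====
-- the two while loops are transcribed as structural recursion on a fuel counter
-- (fuel = lines.length (+1) bounds the number of iterations, since j and i strictly increase)
def find_all_setext_sections (lines : List String) : List (String × Int × Int) :=
  pvLoopA lines (lines.length + 1) 0 []

-- ===== PORT B =====
def find_all_setext_sections_alt (lines : List String) : List (String × Int × Int) :=
  let n := lines.length
  let candidates := (List.range (n - 1)).filter (fun p => pvIsUnderline (lines.getD (p + 1) ""))
  let kept := (candidates.foldl
      (fun (st : List Nat × Int) (p : Nat) =>
        if (p : Int) ≥ st.2 + 2 then (st.1 ++ [p], (p : Int)) else st)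
      ([], -2)).1
  (kept.zip (kept.drop 1 ++ [n])).map
    (fun pe => (pvNormalize (lines.getD pe.1 ""), (pe.1 : Int), (pe.2 : Int)))

-- ===== PRECONDITION & SPEC =====
def Spec_find_all_setext_sections (lines : List String) (out : List (String × Int × Int)) : Prop := out = find_all_setext_sections_alt lines
instance (lines : List String) (out : List (String × Int × Int)) : Decidable (Spec_find_all_setext_sections lines out) := by unfold Spec_find_all_setext_sections; infer_instance

-- ===== CLAIM (what is proved, stated in full; the proofs are below) =====
def Claim_equal_find_all_setext_sections : Prop := ∀ (lines : List String), Dom_find_all_setext_sections lines → Spec_find_all_setext_sections lines (find_all_setext_sections lines)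

-- ===== LEMMAS AND PROOFS =====
def pvCands (lines : List String) (i : Nat) : List Nat :=
  (List.range' i (lines.length - 1 - i)).filter (fun p => pvIsUnderline (lines.getD (p + 1) ""))
def pvNext (lines : List String) (i : Nat) : Option Nat := (pvCands lines i).head?
def pvChain (lines : List String) : Nat → Nat → List Nat
  | 0, _ => []
  | fuel + 1, i =>
    match pvNext lines i with
    | none => []
    | some p => p :: pvChain lines fuel (p + 2)
def pvRanges (lines : List String) : List Nat → List (String × Int × Int)
  | [] => []
  | [p] => [(pvNormalize (lines.getD p ""), (p : Int), (lines.length : Int))]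
  | p :: q :: rest =>
      (pvNormalize (lines.getD p ""), (p : Int), (q : Int)) :: pvRanges lines (q :: rest)
def pvGreedy (last : Int) : List Nat → List Nat
  | [] => []
  | p :: rest => if (p : Int) ≥ last + 2 then p :: pvGreedy (p : Int) rest else pvGreedy last rest
-- cands structure
theorem pvCands_stop (lines : List String) (i : Nat) (h : ¬ i < lines.length - 1) :
    pvCands lines i = [] := by
  unfold pvCands
  have : lines.length - 1 - i = 0 := by omega
  simp [this]
theorem pvCands_cons_true (lines : List String) (i : Nat) (h : i < lines.length - 1)
    (hU : pvIsUnderline (lines.getD (i + 1) "") = true) :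
    pvCands lines i = i :: pvCands lines (i + 1) := by
  unfold pvCands
  have h1 : lines.length - 1 - i = (lines.length - 1 - (i + 1)) + 1 := by omega
  rw [h1, List.range'_succ, List.filter_cons]
  simp only [List.getD] at hU
  simp [hU]
theorem pvCands_cons_false (lines : List String) (i : Nat) (h : i < lines.length - 1)
    (hU : pvIsUnderline (lines.getD (i + 1) "") = false) :
    pvCands lines i = pvCands lines (i + 1) := by
  unfold pvCands
  have h1 : lines.length - 1 - i = (lines.length - 1 - (i + 1)) + 1 := by omega
  rw [h1, List.range'_succ, List.filter_cons]
  simp only [List.getD] at hU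
  simp [hU]
-- pvNext facts
theorem pvNext_none (lines : List String) (i : Nat) (h : ¬ i < lines.length - 1) :
    pvNext lines i = none := by
  unfold pvNext; rw [pvCands_stop lines i h]; rfl
theorem pvNext_self (lines : List String) (i : Nat) (h : i < lines.length - 1)
    (hU : pvIsUnderline (lines.getD (i + 1) "") = true) :
    pvNext lines i = some i := by
  unfold pvNext; rw [pvCands_cons_true lines i h hU]; rfl
theorem pvNext_step (lines : List String) (i : Nat) (h : i < lines.length - 1)
    (hU : pvIsUnderline (lines.getD (i + 1) "") = false) :
    pvNext lines i = pvNext lines (i + 1) := by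
  unfold pvNext; rw [pvCands_cons_false lines i h hU]
theorem pvNext_some (lines : List String) (i : Nat) {p : Nat}
    (h : pvNext lines i = some p) :
    i ≤ p ∧ p < lines.length - 1 ∧ pvIsUnderline (lines.getD (p + 1) "") = true := by
  have hmem : p ∈ pvCands lines i := by
    unfold pvNext at h
    exact List.mem_of_mem_head? (by simp [h])
  unfold pvCands at hmem
  rw [List.mem_filter] at hmem
  obtain ⟨hr, hP⟩ := hmem
  rw [List.mem_range'_1] at hr
  refine ⟨by omega, by omega, by simpa [List.getD] using hP⟩
theorem pvChain_none (lines : List String) (fuel i : Nat) (h : pvNext lines i = none) :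
    pvChain lines fuel i = [] := by
  cases fuel with
  | zero => rfl
  | succ f => unfold pvChain; rw [h]
theorem pvChain_some (lines : List String) (fuel i p : Nat) (h : pvNext lines i = some p) :
    pvChain lines (fuel + 1) i = p :: pvChain lines fuel (p + 2) := by
  conv_lhs => rw [pvChain]
  rw [h]
theorem pvChain_fuel (lines : List String) :
    ∀ fuel fuel' i, lines.length - i ≤ fuel → lines.length - i ≤ fuel' →
      pvChain lines fuel i = pvChain lines fuel' i := by
  intro fuel
  induction fuel with
  | zero =>
      intro fuel' i h _
      rw [pvChain_none lines fuel' i (pvNext_none lines i (by omega))]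
      rfl
  | succ f ih =>
      intro fuel' i h h'
      rcases hq : pvNext lines i with _ | q
      · rw [pvChain_none lines _ i hq, pvChain_none lines _ i hq]
      · obtain ⟨hq1, hq2, _⟩ := pvNext_some lines i hq
        cases fuel' with
        | zero => omega
        | succ f' =>
            rw [pvChain_some lines f i q hq, pvChain_some lines f' i q hq]
            rw [ih f' (q + 2) (by omega) (by omega)]
theorem pvChain_step (lines : List String) (fuel i : Nat) (h : i < lines.length - 1)
    (hU : pvIsUnderline (lines.getD (i + 1) "") = false)
    (hf : lines.length - i ≤ fuel + 1) :
    pvChain lines (fuel + 1) i = pvChain lines fuel (i + 1) := by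
  have hnext := pvNext_step lines i h hU
  rcases hq : pvNext lines (i + 1) with _ | q
  · rw [pvChain_none lines _ i (hnext.trans hq), pvChain_none lines _ _ hq]
  · obtain ⟨hq1, hq2, _⟩ := pvNext_some lines (i + 1) hq
    cases fuel with
    | zero => omega
    | succ f =>
        rw [pvChain_some lines _ i q (hnext.trans hq), pvChain_some lines f (i + 1) q hq]
        rw [pvChain_fuel lines (f + 1) f (q + 2) (by omega) (by omega)]
theorem pvFindEndA_succ (lines : List String) (f j : Nat) :
    pvFindEndA lines (f + 1) j =
      if j < lines.length - 1 then
        if pvIsUnderline (lines.getD (j + 1) "") then j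
        else pvFindEndA lines f (j + 1)
      else j := rfl
theorem pvFindEnd_eq (lines : List String) :
    ∀ fuel j, lines.length - 1 - j ≤ fuel →
      (if pvFindEndA lines fuel j < lines.length - 1 then pvFindEndA lines fuel j
        else lines.length) = (pvNext lines j).getD lines.length := by
  intro fuel
  induction fuel with
  | zero =>
      intro j h
      rw [pvNext_none lines j (by omega)]
      unfold pvFindEndA
      simp only [Option.getD_none]
      rw [if_neg (by omega)]
  | succ f ih =>
      intro j h
      by_cases hj : j < lines.length - 1
      · rcases hU : pvIsUnderline (lines.getD (j + 1) "") with _ | _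
        · rw [pvNext_step lines j hj hU, ← ih (j + 1) (by omega), pvFindEndA_succ]
          simp only [List.getD] at hU
          simp [hj, hU]
        · rw [pvNext_self lines j hj hU, pvFindEndA_succ]
          simp only [List.getD] at hU
          simp [hj, hU]
      · rw [pvNext_none lines j hj, pvFindEndA_succ]
        simp [hj]
theorem pvLoopA_succ (lines : List String) (f i : Nat) (acc : List (String × Int × Int)) :
    pvLoopA lines (f + 1) i acc =
      if i < lines.length - 1 then
        if pvIsUnderline (if i + 1 < lines.length then lines.getD (i + 1) "" else "") then
          pvLoopA lines f
            (if pvFindEndA lines lines.length (i + 2) < lines.length - 1 then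
              pvFindEndA lines lines.length (i + 2) else lines.length)
            (acc ++ [(pvNormalize (lines.getD i ""), (i : Int),
              ((if pvFindEndA lines lines.length (i + 2) < lines.length - 1 then
                pvFindEndA lines lines.length (i + 2) else lines.length : Nat) : Int))])
        else pvLoopA lines f (i + 1) acc
      else acc := rfl
theorem pvLoopA_eq (lines : List String) :
    ∀ fuel i acc, lines.length - i < fuel →
      pvLoopA lines fuel i acc = acc ++ pvRanges lines (pvChain lines fuel i) := by
  intro fuel
  induction fuel with
  | zero => intro i acc h; omega
  | succ f ih =>
      intro i acc h
      rw [pvLoopA_succ]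
      by_cases hi : i < lines.length - 1
      · have h1 : i + 1 < lines.length := by omega
        rw [if_pos hi, if_pos h1]
        rcases hU : pvIsUnderline (lines.getD (i + 1) "") with _ | _
        · rw [if_neg (by simp)]
          rw [ih (i + 1) acc (by omega)]
          rw [pvChain_step lines f i hi hU (by omega)]
        · rw [if_pos rfl]
          rw [pvFindEnd_eq lines lines.length (i + 2) (by omega)]
          rw [pvChain_some lines f i i (pvNext_self lines i hi hU)]
          rcases hq : pvNext lines (i + 2) with _ | q
          · simp only [Option.getD_none]
            rw [ih lines.length _ (by omega)]
            rw [pvChain_none lines f lines.length (pvNext_none lines _ (by omega))]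
            rw [pvChain_none lines f (i + 2) hq]
            simp [pvRanges]
          · simp only [Option.getD_some]
            obtain ⟨hq1, hq2, hq3⟩ := pvNext_some lines (i + 2) hq
            rw [ih q _ (by omega)]
            cases f with
            | zero => omega
            | succ f' =>
                rw [pvChain_some lines f' (i + 2) q hq]
                rw [pvChain_some lines f' q q (pvNext_self lines q hq2 hq3)]
                simp [pvRanges]
      · rw [if_neg hi]
        rw [pvChain_none lines (f + 1) i (pvNext_none lines i hi)]
        simp [pvRanges]
theorem pvFoldl_greedy (cs : List Nat) (k : List Nat) (last : Int) :
    (cs.foldl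
      (fun (st : List Nat × Int) (p : Nat) =>
        if (p : Int) ≥ st.2 + 2 then (st.1 ++ [p], (p : Int)) else st)
      (k, last)).1 = k ++ pvGreedy last cs := by
  induction cs generalizing k last with
  | nil => simp [pvGreedy]
  | cons p rest ih =>
      simp only [List.foldl_cons, pvGreedy]
      by_cases hp : (p : Int) ≥ last + 2
      · simp [hp, ih]
      · simp [hp, ih]
theorem pvGreedy_eq_chain (lines : List String) :
    ∀ fuel i (last : Int), lines.length - i ≤ fuel → last + 2 ≤ (i : Int) →
      pvGreedy last (pvCands lines i) = pvChain lines fuel i := by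
  intro fuel
  induction fuel with
  | zero =>
      intro i last hn _
      rw [pvCands_stop lines i (by omega), pvChain_none lines 0 i (pvNext_none lines i (by omega))]
      rfl
  | succ f ih =>
      intro i last hn hl
      by_cases h : i < lines.length - 1
      · rcases hU : pvIsUnderline (lines.getD (i + 1) "") with _ | _
        · rw [pvCands_cons_false lines i h hU]
          rw [ih (i + 1) last (by omega) (by push_cast; omega)]
          exact (pvChain_step lines f i h hU (by omega)).symm
        · rw [pvCands_cons_true lines i h hU]
          rw [pvChain_some lines f i i (pvNext_self lines i h hU)]
          simp only [pvGreedy, ge_iff_le, hl, if_pos]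
          congr 1
          by_cases h2 : i + 1 < lines.length - 1
          · rcases hU2 : pvIsUnderline (lines.getD (i + 1 + 1) "") with _ | _
            · rw [pvCands_cons_false lines (i + 1) h2 hU2]
              exact ih (i + 2) (i : Int) (by omega) (by push_cast; omega)
            · rw [pvCands_cons_true lines (i + 1) h2 hU2]
              simp only [pvGreedy, ge_iff_le]
              rw [if_neg (by push_cast; omega)]
              exact ih (i + 2) (i : Int) (by omega) (by push_cast; omega)
          · rw [pvCands_stop lines (i + 1) h2,
                pvChain_none lines f (i + 2) (pvNext_none lines (i + 2) (by omega))]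
            rfl
      · rw [pvCands_stop lines i h, pvChain_none lines (f + 1) i (pvNext_none lines i h)]
        rfl
theorem pvZip_ranges (lines : List String) (ks : List Nat) :
    (ks.zip (ks.drop 1 ++ [lines.length])).map
      (fun pe => (pvNormalize (lines.getD pe.1 ""), (pe.1 : Int), (pe.2 : Int)))
      = pvRanges lines ks := by
  induction ks using pvRanges.induct with
  | case1 => simp [pvRanges]
  | case2 p => simp [pvRanges]
  | case3 p q rest ih => simpa [pvRanges] using ih

-- ===== VERDICT (by name: the statement is the Claim_ definition above) =====
theorem find_all_setext_sections_spec : Claim_equal_find_all_setext_sections := by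
  intro lines _
  unfold Spec_find_all_setext_sections find_all_setext_sections find_all_setext_sections_alt
  dsimp only
  rw [pvLoopA_eq lines (lines.length + 1) 0 [] (by omega), pvFoldl_greedy]
  rw [show (List.range (lines.length - 1)).filter
        (fun p => pvIsUnderline (lines.getD (p + 1) "")) = pvCands lines 0 by
      simp [pvCands, List.range_eq_range']]
  rw [pvGreedy_eq_chain lines (lines.length + 1) 0 (-2) (by omega) (by norm_num),
      ← pvZip_ranges lines (pvChain lines (lines.length + 1) 0)]
  simp [List.getD, List.drop_one]
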